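-- pv_equiv track=rewrite | github.com/PNJaenichen/PNJaenichen.github.io | projects/adventOfCode/2021/Day13.py | findMaxes
-- ===== SOURCE A (Python) =====
-- def findMaxes(coords):
--   max_x = 0
--   max_y = 0
--   for coord in coords:
--     if coord[0] > max_x:
--       max_x = coord[0]
--     if coord[1] > max_y:
--       max_y = coord[1]
--   return max_x, max_y
-- ===== SOURCE B (Python) =====
-- def findMaxes(coords):
--   if not coords:
--     return 0, 0
--   x, y = coords[0]
--   mx, my = findMaxes(coords[1:])
--   return (x if x > mx else mx), (y if y > my else my)
-- ===== Notes on version B (the rewrite author's own statement) =====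
-- stated objective: alternative
-- what changed: Replace A's iterative accumulator loop with structural recursion on the list: recurse on the tail, then combine the head coordinate with the tail's maxima back-to-front, with (0,0) as the base case.
import Mathlib
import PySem

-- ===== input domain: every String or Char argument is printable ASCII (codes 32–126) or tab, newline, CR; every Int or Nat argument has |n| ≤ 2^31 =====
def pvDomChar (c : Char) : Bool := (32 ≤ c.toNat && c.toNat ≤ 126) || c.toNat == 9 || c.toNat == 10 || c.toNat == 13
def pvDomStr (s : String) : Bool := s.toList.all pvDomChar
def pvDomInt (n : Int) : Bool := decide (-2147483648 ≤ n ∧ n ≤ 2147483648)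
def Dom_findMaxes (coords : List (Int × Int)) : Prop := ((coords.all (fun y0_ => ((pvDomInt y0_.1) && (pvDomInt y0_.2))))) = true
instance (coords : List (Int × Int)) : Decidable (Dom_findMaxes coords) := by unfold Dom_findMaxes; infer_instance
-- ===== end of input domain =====

-- B replaces A's iterative accumulator loop with structural recursion combining back-to-front; objective: alternative decomposition, same cost.


-- ===== PORT A =====
def findMaxes (coords : List (Int × Int)) : Int × Int :=
  coords.foldl
    (fun st coord =>
      let mx := if coord.1 > st.1 then coord.1 else st.1
      let my := if coord.2 > st.2 then coord.2 else st.2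
      (mx, my))
    (0, 0)

-- ===== PORT B =====
-- B: structural recursion on the list, combining the head with the tail's maxima
def findMaxes_alt : List (Int × Int) → Int × Int
  | [] => (0, 0)
  | (x, y) :: rest =>
      let m := findMaxes_alt rest
      ((if x > m.1 then x else m.1), (if y > m.2 then y else m.2))

-- ===== PRECONDITION & SPEC =====
def Spec_findMaxes (coords : List (Int × Int)) (out : Int × Int) : Prop := out = findMaxes_alt coords
instance (coords : List (Int × Int)) (out : Int × Int) : Decidable (Spec_findMaxes coords out) := by unfold Spec_findMaxes; infer_instance

-- ===== CLAIM (what is proved, stated in full; the proofs are below) =====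
def Claim_equal_findMaxes : Prop := ∀ (coords : List (Int × Int)), Dom_findMaxes coords → Spec_findMaxes coords (findMaxes coords)

-- ===== LEMMAS AND PROOFS =====

-- A's fold from any accumulator is the pair of column folds of max
theorem fold_eq (coords : List (Int × Int)) (mx my : Int) :
    coords.foldl
      (fun st coord =>
        let mx := if coord.1 > st.1 then coord.1 else st.1
        let my := if coord.2 > st.2 then coord.2 else st.2
        (mx, my))
      (mx, my)
    = ((coords.map Prod.fst).foldl max mx, (coords.map Prod.snd).foldl max my) := by
  induction coords generalizing mx my with
  | nil => rfl
  | cons c cs ih =>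
      have h1 : (if c.1 > mx then c.1 else mx) = max mx c.1 := by
        simp [max_def]; split_ifs <;> omega
      have h2 : (if c.2 > my then c.2 else my) = max my c.2 := by
        simp [max_def]; split_ifs <;> omega
      simp only [List.foldl, List.map, h1, h2, ih]

-- B's recursion computes the same pair of column folds starting from 0
theorem alt_eq (coords : List (Int × Int)) :
    findMaxes_alt coords
    = ((coords.map Prod.fst).foldl max 0, (coords.map Prod.snd).foldl max 0) := by
  induction coords with
  | nil => rfl
  | cons c cs ih =>
      obtain ⟨x, y⟩ := c
      have hx : (List.map Prod.fst cs).foldl max (max 0 x) = max x ((List.map Prod.fst cs).foldl max 0) := by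
        rw [max_comm 0 x, List.foldl_assoc]
      have hy : (List.map Prod.snd cs).foldl max (max 0 y) = max y ((List.map Prod.snd cs).foldl max 0) := by
        rw [max_comm 0 y, List.foldl_assoc]
      simp only [findMaxes_alt, ih, List.map, List.foldl, hx, hy]
      refine Prod.ext ?_ ?_ <;> (simp [max_def]; split_ifs <;> omega)

-- ===== VERDICT (by name: the statement is the Claim_ definition above) =====
theorem findMaxes_spec : Claim_equal_findMaxes := by
  intro coords _
  unfold Spec_findMaxes findMaxes
  rw [fold_eq, alt_eq]
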